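-- pv_equiv track=rewrite | github.com/rizac/stream2segment | stream2segment/download/inputvalidation.py | valid_nslc
-- ===== SOURCE A (Python) =====
-- def valid_nslc(value):
--     """Return a nslc (network/station/location/channel) parameter value
--     converted as list. This method cleans-up and checks `value` splitting each
--     of its string elements with the comma "," and aggregating all the string
--     chunks into a single list, after performing some sanity check. The
--     resulting list is also sorted alphabetically (for unit testing and
--     readability). Raises ValueError in case some sanity checks fail (e.g.,
--     conflicts, syntax errors)
--
--     Examples:
--
--     Func. arguments      Result (with comment)
--     =================== =================================================
--     (['A','D','C','B'])  ['A', 'B', 'C', 'D']  # note result is sorted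
--     ('B,C,D,A')          ['A', 'B', 'C', 'D']  # same as above
--     ('A*, B??, C*')      ['A*', 'B??', 'C*']  # FDSN wildcards accepted
--     ('!A*, B??, C*')     ['!A*', 'B??', 'C*']  # in s2s, !A* means "not A*"
--     (' A, B ')           ['A', 'B']  # leading and trailing spaces ignored
--     ('*')                []  # [] means "match all"
--     ([])                 []  # same as above
--     ('  ')               ['']  # string is stripped: match the empty string
--     ("")                 [""]  # match the empty string
--     ("!")                ['!']  # match any non empty string
--     ("!*")               this raises (you cannot specify "discard all")
--     ("!H*, H*")          this raises (it's a paradox)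
--     (" A B,  CD")        this raises ('A B' invalid: only leading and trailing
--                                       spaces allowed)
--
--     :param value: string or iterable of strings: (iterable in this context
--         means Python iterable EXCEPT strings). If string, the argument will be
--         converted to the list [value] to make it iterable before processing it
--     """
--     try:
--         strings = set()
--
--         # we assume, when parsearg is not list, that parsearg is str in both
--         # py2 and py3, i.e. it is NOT bytes in python2. The line below checks
--         # if is an iterable first:
--         # in python2, it is sufficient to say it's not a string
--         # in python3, we need to check that is no str also
--         if not hasattr(value, "__iter__") or isinstance(value, str):
--             # it's an iterable not a string
--             value = [value]
--
--         for string in value: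
--             splitted = string.split(",")
--             for chunk in splitted:
--                 chunk = chunk.strip()
--                 if ' ' in chunk:
--                     raise Exception("invalid space char(s): '%s'" % chunk)
--                 # if i == 3 (location) convert '--' to '':
--                 strings.add(chunk)
--
--         # some checks:
--         if "!*" in strings:  # discard everything is not valid
--             raise ValueError("'!*' (=discard all) invalid")
--         elif "*" in strings:  # accept everything or X => X is redundant
--             strings = set(_ for _ in strings if _[0:1] == '!')
--         else:
--             for string in strings:  # accept A end discard A is not valid
--                 opposite = "!%s" % string
--                 if opposite in strings:
--                     raise Exception("conflicting values: '%s' and '%s'" %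
--                                     (string, opposite))
--
--         return sorted(strings)
--
--     except Exception as exc:
--         raise ValueError(str(exc))
-- ===== SOURCE B (Python) =====
-- def valid_nslc(value):
--     if not hasattr(value, "__iter__") or isinstance(value, str):
--         value = [value]
--     chunks = []
--     for s in value:
--         for c in s.split(","):
--             c = c.strip()
--             if " " in c:
--                 raise ValueError("invalid space char(s): '%s'" % c)
--             chunks.append(c)
--     # sort-based pipeline: no hash set anywhere.
--     chunks.sort()
--     uniq = []
--     for c in chunks:              # adjacent dedup of the sorted list
--         if not uniq or uniq[-1] != c:
--             uniq.append(c)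
--     # names appearing negated, without their '!', still sorted
--     neg = [c[1:] for c in uniq if c.startswith("!")]
--     if "*" in neg:                # i.e. '!*' was given
--         raise ValueError("'!*' (=discard all) invalid")
--     if "*" in uniq:               # keep only the negations; prefixing '!' keeps order
--         return ["!" + n for n in neg]
--     # conflict x vs !x: two-pointer merge of the two sorted lists
--     i = j = 0
--     while i < len(uniq) and j < len(neg):
--         if uniq[i] == neg[j]:
--             raise ValueError("conflicting values: '%s' and '!%s'" % (uniq[i], uniq[i]))
--         if uniq[i] < neg[j]:
--             i += 1
--         else:
--             j += 1
--     return uniq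
-- ===== Notes on version B (the rewrite author's own statement) =====
-- stated objective: alternative
-- what changed: Replaces A's hash-set pipeline (set build, per-element '!'+s membership probe, final sort) by a sort-based one: sort the stripped chunks, deduplicate adjacent duplicates, peel the negated names once, and detect x/!x conflicts with a two-pointer merge of the two sorted lists; the result list is already sorted so no final sort is needed.
import Mathlib
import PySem

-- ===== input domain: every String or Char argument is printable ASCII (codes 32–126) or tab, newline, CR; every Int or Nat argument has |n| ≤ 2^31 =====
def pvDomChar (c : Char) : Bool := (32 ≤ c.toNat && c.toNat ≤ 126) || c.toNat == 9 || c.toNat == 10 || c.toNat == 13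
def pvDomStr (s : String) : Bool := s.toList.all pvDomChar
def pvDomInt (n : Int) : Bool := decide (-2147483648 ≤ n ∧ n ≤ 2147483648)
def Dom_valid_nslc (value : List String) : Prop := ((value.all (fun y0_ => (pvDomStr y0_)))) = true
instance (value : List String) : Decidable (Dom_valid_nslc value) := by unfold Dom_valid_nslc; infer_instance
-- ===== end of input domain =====

-- B replaces A's hash-set pipeline (set build, per-element "!"+s membership probe, final
-- sort) by a sort-based one: sort chunks, dedup adjacent duplicates, and find x/!x
-- conflicts by a two-pointer merge of two sorted lists (alternative algorithm, same cost).
-- On inputs where the Python raises ValueError, both ports return [] (excluded by Pre_).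


-- ===== PORT A =====
-- literal port of A; the ValueError paths (space in chunk, '!*', conflict) return []
-- and are excluded by Pre_valid_nslc.  s.split(",") = (split? s ",").getD [] (never none: sep ≠ "").
def valid_nslc (value : List String) : List String :=
  let strings : PySem.Set String :=
    value.foldl (fun acc s =>
      ((PySem.Str.split? s ",").getD []).foldl
        (fun acc chunk => PySem.Set.add acc (PySem.Str.strip chunk)) acc)
      PySem.Set.empty
  -- Python raises inside the chunk loop on "' ' in chunk"; under Pre_ it never fires,
  -- so checking it here over the finished set is exact on every admitted input
  if (strings : List String).any (fun c => PySem.Str.isIn " " c) then []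
  else if PySem.Set.contains strings "!*" then []      -- raise ValueError
  else if PySem.Set.contains strings "*" then
    PySem.List.sorted
      ((strings : List String).filter (fun s => PySem.Str.slice s (some 0) (some 1) == "!"))
      (fun x => x) false
  else if (strings : List String).any (fun s => PySem.Set.contains strings ("!" ++ s)) then []  -- raise conflict
  else PySem.List.sorted (strings : List String) (fun x => x) false

-- ===== PORT B =====
-- the flat stripped chunk list built by Source B's parse loop (also used by Pre_valid_nslc)
def nslcChunks (value : List String) : List String :=
  value.flatMap (fun s => ((PySem.Str.split? s ",").getD []).map PySem.Str.strip)

-- Source B's adjacent-dedup loop over the sorted list ('if not uniq or uniq[-1] != c')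
def nslcDedupAdj (l : List String) : List String :=
  l.foldl (fun u c => if u.getLast? = some c then u else u ++ [c]) []

-- Source B's two-pointer while loop (i/j indices become the two list tails)
def nslcMerge : List String → List String → Bool
  | [], _ => false
  | _ :: _, [] => false
  | p :: ps, n :: ns =>
    if p = n then true
    else if p < n then nslcMerge ps (n :: ns)
    else nslcMerge (p :: ps) ns
termination_by u n => u.length + n.length

def valid_nslc_alt (value : List String) : List String :=
  let chunks := nslcChunks value
  -- Python raises inside the parse loop on a space; under Pre_ it never fires,
  -- so checking it here over the flat list is exact on every admitted input
  if chunks.any (fun c => PySem.Str.isIn " " c) then []          -- raise ValueError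
  else
    let uniq := nslcDedupAdj (PySem.List.sorted chunks (fun x => x) false)
    let neg := (uniq.filter (fun c => PySem.Str.startswith c "!")).map
      (fun c => PySem.Str.slice c (some 1) none)
    if neg.contains "*" then []                                   -- raise: '!*' given
    else if uniq.contains "*" then neg.map (fun n => "!" ++ n)
    else if nslcMerge uniq neg then []                            -- raise: conflict
    else uniq

-- ===== PRECONDITION & SPEC =====
-- Pre_ excludes exactly the inputs on which the Python A raises ValueError: a stripped
-- chunk containing a space, the chunk '!*', or (without '*') a chunk together with its
-- '!'-negation.
def Pre_valid_nslc (value : List String) : Prop :=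
  (∀ c ∈ nslcChunks value, PySem.Str.isIn " " c = false) ∧
  "!*" ∉ nslcChunks value ∧
  ("*" ∈ nslcChunks value ∨ ∀ c ∈ nslcChunks value, ("!" ++ c) ∉ nslcChunks value)
instance (value : List String) : Decidable (Pre_valid_nslc value) := by
  unfold Pre_valid_nslc; infer_instance

def pvWitness_valid_nslc : List String := ["N1,N2", "!N3", " A* "]

def Spec_valid_nslc (value : List String) (out : List String) : Prop := out = valid_nslc_alt value
instance (value : List String) (out : List String) : Decidable (Spec_valid_nslc value out) := by
  unfold Spec_valid_nslc; infer_instance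

-- ===== CLAIM (what is proved, stated in full; the proofs are below) =====
def Claim_equal_valid_nslc : Prop :=
  ∀ (value : List String), Dom_valid_nslc value → Pre_valid_nslc value →
    Spec_valid_nslc value (valid_nslc value)

-- ===== LEMMAS AND PROOFS =====

-- A's nested add-loop builds exactly set(chunks)
lemma nslc_sets_eq (value : List String) :
    value.foldl (fun acc s =>
      ((PySem.Str.split? s ",").getD []).foldl
        (fun acc chunk => PySem.Set.add acc (PySem.Str.strip chunk)) acc)
      PySem.Set.empty
    = PySem.Set.ofList (nslcChunks value) := by
  rw [PySem.Set.ofList_eq_foldl, nslcChunks, List.foldl_flatMap]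
  apply PySem.List.foldl_congr_mem
  intro acc s _
  rw [List.foldl_map]

-- chunk[0:1] == '!'  is  chunk.startswith('!')
lemma nslc_slice01_eq_startswith (s : String) :
    (PySem.Str.slice s (some 0) (some 1) == "!") = PySem.Str.startswith s "!" := by
  have hs : (PySem.Str.slice s (some 0) (some 1)).toList = s.toList.take 1 := by
    rw [PySem.Str.toList_slice]
    simp only [PySem.Chars.slice, PySem.List.slice_zero_start]
    rw [show (some (1:Int)) = some ((1:Nat):Int) from rfl, PySem.List.slice_to_natCast]
  rw [Bool.eq_iff_iff, beq_iff_eq, ← String.toList_inj, hs, PySem.Str.startswith_eq,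
    PySem.Chars.startswith_iff, show ("!" : String).toList = ['!'] from rfl]
  rcases s.toList with _ | ⟨c, t⟩ <;> simp [List.cons_prefix_cons, eq_comm]

-- '!' + s[1:] = s when s starts with '!'
lemma nslc_bang_slice (s : String) (h : PySem.Str.startswith s "!" = true) :
    "!" ++ PySem.Str.slice s (some 1) none = s := by
  rw [← String.toList_inj, String.toList_append, PySem.Str.toList_slice]
  simp only [PySem.Chars.slice, PySem.List.slice_from_one]
  rw [PySem.Str.startswith_eq, PySem.Chars.startswith_iff,
    show ("!" : String).toList = ['!'] from rfl] at h
  rw [show ("!" : String).toList = ['!'] from rfl]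
  rcases hs : s.toList with _ | ⟨c, t⟩ <;> rw [hs] at h
  · simp_all
  · simp_all [List.cons_prefix_cons]
    exact h

lemma nslc_contains_iff (l : List String) (x : String) :
    PySem.Set.contains l x = true ↔ x ∈ l := by
  simp [PySem.Set.contains]

-- every element of a ≤-sorted nonempty list is ≤ its last element
lemma nslc_le_getLast (u : List String) (hu : u.Pairwise (· ≤ ·)) (a : String)
    (ha : a ∈ u) (m : String) (hm : u.getLast? = some m) : a ≤ m := by
  induction u with
  | nil => cases ha
  | cons x t ih =>
    rcases List.pairwise_cons.mp hu with ⟨hx, ht⟩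
    cases t with
    | nil =>
      simp only [List.getLast?_singleton, Option.some.injEq] at hm
      rcases List.mem_singleton.mp ha with rfl
      exact le_of_eq hm
    | cons y s =>
      rw [List.getLast?_cons_cons] at hm
      rcases List.mem_cons.mp ha with rfl | ha
      · exact hx m (List.mem_of_getLast? hm)
      · exact ih ht ha hm

-- invariant of Source B's adjacent-dedup loop
lemma nslc_dedup_go (l : List String) : ∀ (u : List String),
    (∀ a ∈ u, ∀ b ∈ l, a ≤ b) → u.Pairwise (· < ·) → l.Pairwise (· ≤ ·) →
    (l.foldl (fun u c => if u.getLast? = some c then u else u ++ [c]) u).Pairwise (· < ·) ∧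
    ∀ x, (x ∈ l.foldl (fun u c => if u.getLast? = some c then u else u ++ [c]) u ↔
      x ∈ u ∨ x ∈ l) := by
  induction l with
  | nil => intro u _ hu _; exact ⟨hu, fun x => by simp⟩
  | cons c t ih =>
    intro u hul hu hl
    rcases List.pairwise_cons.mp hl with ⟨hcl, ht⟩
    simp only [List.foldl_cons]
    by_cases h : u.getLast? = some c
    · rw [if_pos h]
      have hc : c ∈ u := List.mem_of_getLast? h
      obtain ⟨P, M⟩ := ih u (fun a ha b hb => hul a ha b (List.mem_cons_of_mem _ hb)) hu ht
      refine ⟨P, fun x => ?_⟩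
      rw [M x]
      constructor
      · rintro (hx | hx)
        · exact Or.inl hx
        · exact Or.inr (List.mem_cons_of_mem _ hx)
      · rintro (hx | hx)
        · exact Or.inl hx
        · rcases List.mem_cons.mp hx with rfl | hx
          · exact Or.inl hc
          · exact Or.inr hx
    · rw [if_neg h]
      have hltc : ∀ a ∈ u, a < c := by
        intro a ha
        refine lt_of_le_of_ne (hul a ha c (List.mem_cons_self)) ?_
        rintro rfl
        obtain ⟨m, hm⟩ := Option.isSome_iff_exists.mp
          (List.getLast?_isSome.mpr (List.ne_nil_of_mem ha))
        have h1 : a ≤ m := nslc_le_getLast u (hu.imp le_of_lt) a ha m hm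
        have h2 : m ≤ a := hul m (List.mem_of_getLast? hm) a (List.mem_cons_self)
        exact h (by rw [hm, le_antisymm h2 h1])
      have hu' : (u ++ [c]).Pairwise (· < ·) := by
        rw [List.pairwise_append]
        exact ⟨hu, List.pairwise_singleton _ _, fun a ha b hb => by
          rcases List.mem_singleton.mp hb with rfl; exact hltc a ha⟩
      have hul' : ∀ a ∈ u ++ [c], ∀ b ∈ t, a ≤ b := by
        intro a ha b hb
        rcases List.mem_append.mp ha with ha | ha
        · exact hul a ha b (List.mem_cons_of_mem _ hb)
        · rcases List.mem_singleton.mp ha with rfl; exact hcl b hb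
      obtain ⟨P, M⟩ := ih (u ++ [c]) hul' hu' ht
      refine ⟨P, fun x => ?_⟩
      rw [M x]
      simp only [List.mem_append, List.mem_cons]
      tauto

-- if the merge loop reports a conflict, the two lists share an element
lemma nslc_merge_true : ∀ (u n : List String), nslcMerge u n = true →
    ∃ x, x ∈ u ∧ x ∈ n := by
  intro u n h
  fun_induction nslcMerge u n with
  | case1 => simp at h
  | case2 => simp at h
  | case3 ps n2 ns => exact ⟨n2, List.mem_cons_self, List.mem_cons_self⟩
  | case4 p ps n2 ns hne hlt ih =>
    obtain ⟨x, hx1, hx2⟩ := ih h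
    exact ⟨x, List.mem_cons_of_mem _ hx1, hx2⟩
  | case5 p ps n2 ns hne hge ih =>
    obtain ⟨x, hx1, hx2⟩ := ih h
    exact ⟨x, hx1, List.mem_cons_of_mem _ hx2⟩

-- ===== VERDICT (by name: the statement is the Claim_ definition above) =====
theorem valid_nslc_spec : Claim_equal_valid_nslc := by
  intro value _ hpre
  obtain ⟨hspace, hbang, hstar⟩ := hpre
  unfold Spec_valid_nslc
  simp only [valid_nslc, valid_nslc_alt, nslc_sets_eq]
  have hmem : ∀ x, x ∈ PySem.Set.ofList (nslcChunks value) ↔ x ∈ nslcChunks value :=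
    fun x => PySem.Set.mem_ofList _ _
  -- uniq = adjacent dedup of the sorted chunks: strictly increasing, same members
  obtain ⟨huP, huM⟩ := nslc_dedup_go (PySem.List.sorted (nslcChunks value) (fun x => x) false)
    [] (by simp) (List.Pairwise.nil) (PySem.List.sorted_pairwise _ _)
  have huP' : (nslcDedupAdj (PySem.List.sorted (nslcChunks value) (fun x => x) false)).Pairwise
      (· < ·) := huP
  have huM' : ∀ x, x ∈ nslcDedupAdj (PySem.List.sorted (nslcChunks value) (fun x => x) false)
      ↔ x ∈ nslcChunks value := by
    intro x
    rw [nslcDedupAdj, huM x]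
    simp [PySem.List.mem_sorted]
  set uniq := nslcDedupAdj (PySem.List.sorted (nslcChunks value) (fun x => x) false) with huniq
  clear huP huM
  -- set(chunks) and uniq are permutations (both nodup, same membership)
  have hperm : uniq.Perm (PySem.Set.ofList (nslcChunks value) : List String) := by
    rw [List.perm_ext_iff_of_nodup (huP'.imp ne_of_lt) (PySem.Set.nodup_ofList _)]
    intro a; rw [huM' a, hmem a]
  -- neither side sees a space
  have hsp : ((PySem.Set.ofList (nslcChunks value) : List String).any
      (fun c => PySem.Str.isIn " " c)) = false := by
    simp only [List.any_eq_false]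
    intro c hc; simpa using hspace c ((hmem c).mp hc)
  have hspB : ((nslcChunks value).any (fun c => PySem.Str.isIn " " c)) = false := by
    simp only [List.any_eq_false]
    intro c hc; simpa using hspace c hc
  rw [hsp, hspB]
  simp only [Bool.false_eq_true, if_false]
  -- '!*' is absent on both sides
  have hb : PySem.Set.contains (PySem.Set.ofList (nslcChunks value)) "!*" = false := by
    rw [Bool.eq_false_iff]
    intro h; exact hbang ((hmem _).mp ((nslc_contains_iff _ _).mp h))
  have hbB : ((uniq.filter (fun c => PySem.Str.startswith c "!")).map
      (fun c => PySem.Str.slice c (some 1) none)).contains "*" = false := by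
    rw [Bool.eq_false_iff]
    intro h
    rw [List.contains_eq_mem, decide_eq_true_eq, List.mem_map] at h
    obtain ⟨c, hc, hcx⟩ := h
    rw [List.mem_filter] at hc
    have hce : c = "!*" := by
      rw [← nslc_bang_slice c hc.2, hcx]; rfl
    exact hbang (hce ▸ (huM' c).mp hc.1)
  rw [hb, hbB]
  simp only [Bool.false_eq_true, if_false]
  by_cases hst : "*" ∈ nslcChunks value
  · -- '*' present: A sorts the '!'-filtered set; B keeps the '!'-block of uniq
    rw [if_pos ((nslc_contains_iff _ _).mpr ((hmem _).mpr hst)),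
      if_pos (by rw [List.contains_eq_mem, decide_eq_true_eq]; exact (huM' _).mpr hst)]
    have hfilter :
        ((PySem.Set.ofList (nslcChunks value) : List String).filter
          (fun s => PySem.Str.slice s (some 0) (some 1) == "!"))
        = ((PySem.Set.ofList (nslcChunks value) : List String).filter
          (fun s => PySem.Str.startswith s "!")) :=
      List.filter_congr (fun s _ => nslc_slice01_eq_startswith s)
    rw [hfilter]
    have hBmap : ((uniq.filter (fun c => PySem.Str.startswith c "!")).map
        (fun c => PySem.Str.slice c (some 1) none)).map (fun n => "!" ++ n)
        = uniq.filter (fun c => PySem.Str.startswith c "!") := by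
      rw [List.map_map]
      have : ∀ c ∈ uniq.filter (fun c => PySem.Str.startswith c "!"),
          ((fun n => "!" ++ n) ∘ fun c => PySem.Str.slice c (some 1) none) c = id c := by
        intro c hc
        rw [List.mem_filter] at hc
        exact nslc_bang_slice c hc.2
      rw [List.map_congr_left this, List.map_id]
    rw [hBmap]
    exact PySem.List.sorted_id_eq_of_perm_of_pairwise _ _
      (hperm.filter _) (huP'.filter _ |>.imp le_of_lt)
  · -- '*' absent: no conflict under Pre_, both return the sorted distinct chunks
    rw [if_neg (show ¬ PySem.Set.contains (PySem.Set.ofList (nslcChunks value)) "*" = true by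
      rw [nslc_contains_iff, hmem]; exact hst)]
    have hnc : ∀ c ∈ nslcChunks value, ("!" ++ c) ∉ nslcChunks value := by
      rcases hstar with h | h
      · exact absurd h hst
      · exact h
    -- A's conflict scan finds nothing
    have hA : ((PySem.Set.ofList (nslcChunks value) : List String).any
        (fun s => PySem.Set.contains (PySem.Set.ofList (nslcChunks value)) ("!" ++ s))) = false := by
      simp only [List.any_eq_false]
      intro s hs hcon
      exact hnc s ((hmem s).mp hs) ((hmem _).mp ((nslc_contains_iff _ _).mp hcon))
    -- B's merge finds nothing
    have hB : nslcMerge uniq ((uniq.filter (fun c => PySem.Str.startswith c "!")).map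
        (fun c => PySem.Str.slice c (some 1) none)) = false := by
      rw [Bool.eq_false_iff]
      intro h
      obtain ⟨x, hx1, hx2⟩ := nslc_merge_true _ _ h
      rw [List.mem_map] at hx2
      obtain ⟨c, hc, hcx⟩ := hx2
      rw [List.mem_filter] at hc
      have hbang_mem : ("!" ++ x) ∈ nslcChunks value := by
        rw [← hcx, nslc_bang_slice c hc.2]
        exact (huM' c).mp hc.1
      exact hnc x ((huM' x).mp hx1) hbang_mem
    rw [hA]
    simp only [Bool.false_eq_true, if_false]
    rw [if_neg (show ¬ uniq.contains "*" = true by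
      rw [List.contains_eq_mem, decide_eq_true_eq, huM']; exact hst), hB]
    simp only [Bool.false_eq_true, if_false]
    exact PySem.List.sorted_id_eq_of_perm_of_pairwise _ _ hperm (huP'.imp le_of_lt)
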